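-- pv_equiv track=rewrite | github.com/eddiedb6/pan | scripts/pos/Console.py | __preHandleCmd
-- ===== SOURCE A (Python) =====
-- def __preHandleCmd(cmdStr):
--     # To remove white space in path
--     isInQuote = False
--     handledStr = ""
--     for c in cmdStr:
--         if c == '\"':
--             isInQuote = not isInQuote
--             continue
--         if c == " " and isInQuote:
--             handledStr += "%20"
--         else:
--             handledStr += c
--     cmds = handledStr.split(" ")
--     result = []
--     for cmd in cmds:
--         result.append(cmd.strip().replace("%20", " "))
--     return result
-- ===== SOURCE B (Python) =====
-- def __preHandleCmd(cmdStr):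
--     # Split on quote chars: even-indexed segments are outside quotes, odd-indexed inside.
--     parts = cmdStr.split('"')
--     handled = "".join(p if i % 2 == 0 else p.replace(" ", "%20")
--                       for i, p in enumerate(parts))
--     return [t.strip().replace("%20", " ") for t in handled.split(" ")]
-- ===== Notes on version B (the rewrite author's own statement) =====
-- stated objective: faster
-- what changed: B never walks the string char by char with an isInQuote flag: it splits on the quote character, escapes spaces only in the odd-indexed (in-quote) segments via str.replace, rejoins, then splits on spaces; A builds the escaped string with a stateful character loop doing per-character string concatenation.
import Mathlib
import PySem

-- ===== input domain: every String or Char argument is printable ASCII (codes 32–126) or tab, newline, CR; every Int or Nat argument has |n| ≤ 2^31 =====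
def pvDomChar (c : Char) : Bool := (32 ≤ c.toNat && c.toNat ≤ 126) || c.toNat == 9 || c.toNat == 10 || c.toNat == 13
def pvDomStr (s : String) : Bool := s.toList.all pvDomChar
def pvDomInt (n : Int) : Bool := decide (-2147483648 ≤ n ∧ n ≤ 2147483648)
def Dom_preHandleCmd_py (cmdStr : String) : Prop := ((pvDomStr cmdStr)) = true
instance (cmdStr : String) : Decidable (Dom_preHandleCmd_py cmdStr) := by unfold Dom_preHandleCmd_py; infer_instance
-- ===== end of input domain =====

-- B replaces A's stateful character loop (isInQuote flag building an escaped string) by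
-- splitting on the quote character and escaping spaces only in the odd-indexed (in-quote)
-- segments, then rejoining (objective: faster by constant factor: bulk split/replace/join instead of a per-character loop).

-- ===== PORT A =====
-- the body of A's "for c in cmdStr" loop (state: isInQuote, handledStr)
def pvStepA (st : Bool × String) (c : Char) : Bool × String :=
  if c = '"' then (!st.1, st.2)
  else if c = ' ' ∧ st.1 then (st.1, st.2 ++ "%20")
  else (st.1, st.2.push c)

def preHandleCmd_py (cmdStr : String) : List String :=
  ((PySem.Str.split? (cmdStr.toList.foldl pvStepA (false, "")).2 " ").getD []).map
    (fun cmd => PySem.Str.replace (PySem.Str.strip cmd) "%20" " ")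

-- ===== PORT B =====
def preHandleCmd_py_alt (cmdStr : String) : List String :=
  let parts := (PySem.Str.split? cmdStr "\"").getD []
  let handled := PySem.Str.join ""
      ((PySem.List.enumerate parts).map
        (fun ip => if ip.1 % 2 = 0 then ip.2 else PySem.Str.replace ip.2 " " "%20"))
  ((PySem.Str.split? handled " ").getD []).map
    (fun t => PySem.Str.replace (PySem.Str.strip t) "%20" " ")

-- ===== PRECONDITION & SPEC =====
def Spec_preHandleCmd_py (cmdStr : String) (out : List String) : Prop := out = preHandleCmd_py_alt cmdStr
instance (cmdStr : String) (out : List String) : Decidable (Spec_preHandleCmd_py cmdStr out) := by unfold Spec_preHandleCmd_py; infer_instance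

-- ===== CLAIM (what is proved, stated in full; the proofs are below) =====
def Claim_equal_preHandleCmd_py : Prop := ∀ (cmdStr : String), Dom_preHandleCmd_py cmdStr → Spec_preHandleCmd_py cmdStr (preHandleCmd_py cmdStr)

-- ===== LEMMAS AND PROOFS =====

-- apply f to the first piece only
def pvMapHead (f : List Char → List Char) : List (List Char) → List (List Char)
  | [] => []
  | t :: ts => f t :: ts

-- A's escape phase, on char lists
def pvEscape : Bool → List Char → List Char
  | _, [] => []
  | q, c :: cs =>
    if c = '"' then pvEscape (!q) cs
    else if c = ' ' ∧ q then '%' :: '2' :: '0' :: pvEscape q cs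
    else c :: pvEscape q cs

-- Python's split(sep) for a one-char sep, on char lists (keeps empty pieces)
def pvSplitC (sep : Char) : List Char → List (List Char)
  | [] => [[]]
  | c :: cs => if c = sep then [] :: pvSplitC sep cs else pvMapHead (fun t => c :: t) (pvSplitC sep cs)

-- per-char replacement of ' ' by "%20"
def pvEsc1 (l : List Char) : List Char := l.flatMap (fun c => if c = ' ' then ['%', '2', '0'] else [c])

-- join of the quote-split segments, escaping the in-quote ones (parity q for the head)
def pvAlt : Bool → List (List Char) → List Char
  | _, [] => []
  | q, t :: ts => (if q then pvEsc1 t else t) ++ pvAlt (!q) ts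

theorem pvSplitC_cons_exists (sep : Char) (l : List Char) : ∃ t ts, pvSplitC sep l = t :: ts := by
  cases l with
  | nil => exact ⟨[], [], rfl⟩
  | cons c cs =>
    obtain ⟨t, ts, h⟩ := pvSplitC_cons_exists sep cs
    by_cases hc : c = sep
    · exact ⟨[], pvSplitC sep cs, by simp [pvSplitC, hc]⟩
    · exact ⟨c :: t, ts, by simp [pvSplitC, hc, h, pvMapHead]⟩

theorem pvMapHead_nilf (sep : Char) (l : List Char) :
    pvMapHead (fun t => [] ++ t) (pvSplitC sep l) = pvSplitC sep l := by
  obtain ⟨t, ts, h⟩ := pvSplitC_cons_exists sep l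
  simp [h, pvMapHead]

theorem pvGo_sep (sep : Char) (fuel : Nat) (l cur : List Char) (acc : List (List Char))
    (h : l.length < fuel) :
    PySem.Chars.splitOn.go [sep] fuel l cur acc
      = acc.reverse ++ pvMapHead (fun t => cur.reverse ++ t) (pvSplitC sep l) := by
  induction fuel generalizing l cur acc with
  | zero => omega
  | succ fuel ih =>
    cases l with
    | nil => simp [PySem.Chars.splitOn.go, pvSplitC, pvMapHead]
    | cons c rest =>
      simp only [PySem.Chars.splitOn.go]
      by_cases hc : c = sep
      · subst hc
        have hp : [c].isPrefixOf (c :: rest) = true := by simp [List.isPrefixOf]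
        rw [if_pos hp]
        have hdrop : List.drop [c].length (c :: rest) = rest := rfl
        simp only [List.length_cons] at h
        rw [hdrop, ih rest [] ((cur.reverse) :: acc) (by omega)]
        obtain ⟨t, ts, hts⟩ := pvSplitC_cons_exists c rest
        simp [pvSplitC, hts, pvMapHead]
      · have hp : [sep].isPrefixOf (c :: rest) = false := by
          simp [List.isPrefixOf]
          exact fun h' => hc h'.symm
        rw [if_neg (by simp [hp])]
        simp only [List.length_cons] at h
        rw [ih rest (c :: cur) acc (by omega)]
        obtain ⟨t, ts, hts⟩ := pvSplitC_cons_exists sep rest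
        simp [pvSplitC, hc, hts, pvMapHead]

theorem pvSplitOn_sep (sep : Char) (l : List Char) :
    PySem.Chars.splitOn l [sep] = pvSplitC sep l := by
  unfold PySem.Chars.splitOn
  rw [pvGo_sep sep (l.length + 1) l [] [] (by omega)]
  simpa using pvMapHead_nilf sep l

theorem pvSplit?_getD (s : String) (sep : Char) :
    (PySem.Str.split? s (String.ofList [sep])).getD []
      = (pvSplitC sep s.toList).map String.ofList := by
  simp [PySem.Str.split?, PySem.Chars.split?, String.toList_ofList, pvSplitOn_sep]

theorem pvFoldA (cs : List Char) (q : Bool) (h : String) :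
    (cs.foldl pvStepA (q, h)).2.toList = h.toList ++ pvEscape q cs := by
  induction cs generalizing q h with
  | nil => simp [pvEscape]
  | cons c cs ih =>
    simp only [List.foldl_cons, pvStepA, pvEscape]
    by_cases hq : c = '"'
    · simp [hq, ih]
    · by_cases hs : c = ' ' ∧ q = true
      · simp only [if_neg hq, if_pos hs, ih]
        simp [hs.2]
      · simp only [if_neg hq, if_neg hs, ih]
        simp

theorem pvRepGo (fuel : Nat) (l acc : List Char) (h : l.length ≤ fuel) :
    PySem.Chars.replace.go [' '] ['%', '2', '0'] fuel l acc = acc.reverse ++ pvEsc1 l := by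
  induction fuel generalizing l acc with
  | zero =>
    have : l = [] := by cases l <;> simp_all
    subst this
    simp [PySem.Chars.replace.go, pvEsc1]
  | succ fuel ih =>
    cases l with
    | nil => simp [PySem.Chars.replace.go, pvEsc1]
    | cons c t =>
      simp only [PySem.Chars.replace.go]
      by_cases hc : c = ' '
      · subst hc
        have hp : [' '].isPrefixOf (' ' :: t) = true := by simp [List.isPrefixOf]
        rw [if_pos hp]
        have hdrop : List.drop [' '].length (' ' :: t) = t := rfl
        simp only [List.length_cons] at h
        rw [hdrop, ih t _ (by omega)]
        simp [pvEsc1]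
      · have hp : [' '].isPrefixOf (c :: t) = false := by
          simp [List.isPrefixOf]
          exact fun h' => hc h'.symm
        rw [if_neg (by simp [hp])]
        simp only [List.length_cons] at h
        rw [ih t _ (by omega)]
        simp [pvEsc1, hc]

theorem pvReplace_space (l : List Char) :
    PySem.Chars.replace l [' '] ['%', '2', '0'] = pvEsc1 l := by
  unfold PySem.Chars.replace
  rw [if_neg (by simp)]
  simpa using pvRepGo l.length l [] (le_refl _)

-- the quote-split/alternating-escape view equals A's stateful escape loop
theorem pvAlt_escape (cs : List Char) (q : Bool) :
    pvAlt q (pvSplitC '"' cs) = pvEscape q cs := by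
  induction cs generalizing q with
  | nil => simp [pvSplitC, pvAlt, pvEsc1, pvEscape]
  | cons c cs ih =>
    by_cases hq : c = '"'
    · subst hq
      simp only [pvSplitC, if_pos rfl, pvEscape]
      simp [pvAlt, pvEsc1, ih]
    · obtain ⟨t, ts, hts⟩ := pvSplitC_cons_exists '"' cs
      have halt : pvAlt q (pvSplitC '"' cs) = (if q then pvEsc1 t else t) ++ pvAlt (!q) ts := by
        rw [hts]; rfl
      simp only [pvSplitC, if_neg hq, hts, pvMapHead, pvAlt, pvEscape, if_neg hq]
      by_cases hs : c = ' ' ∧ q = true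
      · obtain ⟨hc', hqt⟩ := hs
        subst hc'; subst hqt
        have : pvEsc1 (' ' :: t) = '%' :: '2' :: '0' :: pvEsc1 t := by simp [pvEsc1]
        rw [if_pos rfl, this, if_pos ⟨rfl, rfl⟩]
        have := ih true
        rw [halt] at this
        simpa using this
      · have hIf : (if c = ' ' ∧ q = true then ('%' :: '2' :: '0' :: pvEscape q cs) else c :: pvEscape q cs) = c :: pvEscape q cs := if_neg hs
        rw [hIf]
        have := ih q
        rw [halt] at this
        cases q with
        | false =>
          simp only [if_neg (by simp : ¬ (False : Prop))] at *
          simp only [Bool.not_false] at this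
          simp [this.symm]
        | true =>
          have hc' : c ≠ ' ' := fun h' => hs ⟨h', rfl⟩
          have hesc : pvEsc1 (c :: t) = c :: pvEsc1 t := by simp [pvEsc1, hc']
          simp only [if_pos rfl] at *
          rw [hesc]
          simp [this.symm]

theorem pvJoinNil_cons (a : List Char) (l : List (List Char)) :
    PySem.Chars.join [] (a :: l) = a ++ PySem.Chars.join [] l := by
  cases l with
  | nil => simp [PySem.Chars.join_singleton, PySem.Chars.join, List.intercalate]
  | cons b rest => rw [PySem.Chars.join_cons_cons]; simp

-- B's enumerate/parity escape of the segments equals the alternating escape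
theorem pvEnumJoin (ts : List (List Char)) (i : Int) (q : Bool)
    (h0 : 0 ≤ i) (hp : i % 2 = 0 ↔ q = false) :
    PySem.Chars.join []
        (((PySem.List.enumerate (ts.map String.ofList) i).map
            (fun ip => if ip.1 % 2 = 0 then ip.2 else PySem.Str.replace ip.2 " " "%20")).map
          String.toList)
      = pvAlt q ts := by
  induction ts generalizing i q with
  | nil => simp [PySem.List.enumerate, pvAlt, PySem.Chars.join, List.intercalate]
  | cons t rest ih =>
    rw [List.map_cons, PySem.List.enumerate_cons, List.map_cons, List.map_cons, pvJoinNil_cons]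
    have hrest : PySem.Chars.join []
        (((PySem.List.enumerate (rest.map String.ofList) (i + 1)).map
            (fun ip => if ip.1 % 2 = 0 then ip.2 else PySem.Str.replace ip.2 " " "%20")).map
          String.toList) = pvAlt (!q) rest := by
      apply ih (i + 1) (!q) (by omega)
      cases q with
      | false =>
        have hi : i % 2 = 0 := hp.mpr rfl
        simp only [Bool.not_false]
        constructor
        · intro h'
          exact absurd h' (by omega)
        · intro h'
          simp at h'
      | true =>
        have hi : i % 2 ≠ 0 := fun h' => by simpa using hp.mp h'
        have h2 : (i + 1) % 2 = 0 := by omega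
        simp [h2]
    rw [hrest]
    cases q with
    | false =>
      have hi : i % 2 = 0 := hp.mpr rfl
      simp [hi, pvAlt, String.toList_ofList]
    | true =>
      have hi : ¬ i % 2 = 0 := fun h' => by simpa using hp.mp h'
      rw [if_neg hi]
      rw [show pvAlt true (t :: rest) = pvEsc1 t ++ pvAlt (!true) rest from by simp [pvAlt]]
      congr 1
      rw [PySem.Str.toList_replace, String.toList_ofList]
      have h1 : (" " : String).toList = [' '] := by decide
      have h2 : ("%20" : String).toList = ['%', '2', '0'] := by decide
      rw [h1, h2, pvReplace_space]

-- ===== VERDICT (by name: the statement is the Claim_ definition above) =====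
theorem preHandleCmd_py_spec : Claim_equal_preHandleCmd_py := by
  intro cmdStr _
  unfold Spec_preHandleCmd_py preHandleCmd_py preHandleCmd_py_alt
  have hq : ("\"" : String) = String.ofList ['"'] := by decide
  have hsp : (" " : String) = String.ofList [' '] := by decide
  have hparts : (PySem.Str.split? cmdStr "\"").getD []
      = (pvSplitC '"' cmdStr.toList).map String.ofList := by
    rw [hq, pvSplit?_getD]
  have hhandled : (PySem.Str.join ""
      ((PySem.List.enumerate ((PySem.Str.split? cmdStr "\"").getD [])).map
        (fun ip => if ip.1 % 2 = 0 then ip.2 else PySem.Str.replace ip.2 " " "%20"))).toList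
      = pvEscape false cmdStr.toList := by
    rw [hparts, PySem.Str.toList_join]
    have h0 : ("" : String).toList = ([] : List Char) := by decide
    rw [h0, List.map_map, ← List.map_map]
    rw [pvEnumJoin (pvSplitC '"' cmdStr.toList) 0 false (by omega) (by simp)]
    exact pvAlt_escape cmdStr.toList false
  have hA : ((cmdStr.toList.foldl pvStepA (false, "")).2).toList = pvEscape false cmdStr.toList := by
    simpa using pvFoldA cmdStr.toList false ""
  -- both sides split the same escaped char list on ' ' and map the same cleanup
  have hstr : (cmdStr.toList.foldl pvStepA (false, "")).2
      = PySem.Str.join ""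
          ((PySem.List.enumerate ((PySem.Str.split? cmdStr "\"").getD [])).map
            (fun ip => if ip.1 % 2 = 0 then ip.2 else PySem.Str.replace ip.2 " " "%20")) := by
    have h := hA.trans hhandled.symm
    exact String.toList_inj.mp h
  rw [hstr]
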